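-- pv_equiv track=rewrite | github.com/qingchuanzhu/PythonPrac | StupidCoder/3Sum/3Sum.py | find_startOfPositive
-- ===== SOURCE A (Python) =====
-- def find_startOfPositive(nums):
--     low = 0
--     high = len(nums) - 1
--     index = -1
--     while low <= high:
--         mid = low + (high - low) // 2
--         if nums[mid] < 0:
--             low = mid + 1
--         else:
--             index = mid
--             high = mid - 1
--
--     return index
-- ===== SOURCE B (Python) =====
-- def find_startOfPositive(nums):
--     for i, x in enumerate(nums):
--         if x >= 0:
--             return i
--     return -1
-- ===== Notes on version B (the rewrite author's own statement) =====
-- stated objective: simpler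
-- what changed: Replaces the hand-written binary-search loop (low/high/mid state) with a single linear scan via enumerate returning the first index whose element is >= 0.
-- outside the precondition, e.g. on find_startOfPositive([0, -1, 2]): A returns 2, B returns 0
import Mathlib
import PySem

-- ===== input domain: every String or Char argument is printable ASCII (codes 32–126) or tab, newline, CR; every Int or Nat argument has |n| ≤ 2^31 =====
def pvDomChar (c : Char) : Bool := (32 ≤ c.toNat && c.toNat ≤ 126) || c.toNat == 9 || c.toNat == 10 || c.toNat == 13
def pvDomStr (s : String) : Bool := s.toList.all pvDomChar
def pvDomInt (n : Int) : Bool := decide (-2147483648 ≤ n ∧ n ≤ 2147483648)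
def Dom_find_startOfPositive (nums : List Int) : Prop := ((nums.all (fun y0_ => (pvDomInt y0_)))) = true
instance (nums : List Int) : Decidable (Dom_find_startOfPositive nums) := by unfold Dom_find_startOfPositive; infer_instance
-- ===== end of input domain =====

-- B replaces A's binary search by a plain left-to-right scan for the first element ≥ 0 (simpler; equal on sorted input — the function's domain).

-- ===== PORT A =====
-- the while-loop of A, with its state (low, high, index); nums[mid] via pyGet? (never out of range when started from A's initial state, so the none branch is unreachable there)
def findLoopA (nums : List Int) (low high index : Int) : Int :=
  if _h : low ≤ high then
    let mid := low + PySem.Int.floordiv (high - low) 2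
    match PySem.List.pyGet? nums mid with
    | some v =>
      if v < 0 then findLoopA nums (mid + 1) high index
      else findLoopA nums low (mid - 1) mid
    | none => index   -- Python would raise IndexError; unreachable from A's initial state
  else index
termination_by (high + 1 - low).toNat
decreasing_by
  · have hd : PySem.Int.floordiv (high - low) 2 = (high - low) / 2 :=
      PySem.Int.floordiv_eq_ediv_of_pos (by omega)
    simp only [hd] at *
    omega
  · have hd : PySem.Int.floordiv (high - low) 2 = (high - low) / 2 :=
      PySem.Int.floordiv_eq_ediv_of_pos (by omega)
    simp only [hd] at *
    omega

def find_startOfPositive (nums : List Int) : Int :=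
  findLoopA nums 0 ((nums.length : Int) - 1) (-1)

-- ===== PORT B =====
-- the for-loop of B: scan with the running index i
def scanB (xs : List Int) (i : Int) : Int :=
  match xs with
  | [] => -1
  | x :: rest => if x ≥ 0 then i else scanB rest (i + 1)

def find_startOfPositive_alt (nums : List Int) : Int :=
  scanB nums 0

-- ===== PRECONDITION & SPEC =====
-- Pre_ admits every list in which no non-negative element is followed by a negative one
-- (all negatives precede all non-negatives — true of every sorted array, the function's
-- stated domain); on other lists A's bisection may return a non-first non-negative index,
-- an artefact of where the midpoints land, which no caller would specify.
def Pre_find_startOfPositive (nums : List Int) : Prop :=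
  List.Pairwise (fun a b => 0 ≤ a → 0 ≤ b) nums
instance (nums : List Int) : Decidable (Pre_find_startOfPositive nums) := by
  unfold Pre_find_startOfPositive; infer_instance

def pvWitness_find_startOfPositive : List Int := [-3, -1, 0, 2, 2]

def Spec_find_startOfPositive (nums : List Int) (out : Int) : Prop := out = find_startOfPositive_alt nums
instance (nums : List Int) (out : Int) : Decidable (Spec_find_startOfPositive nums out) := by unfold Spec_find_startOfPositive; infer_instance

-- ===== CLAIM (what is proved, stated in full; the proofs are below) =====
def Claim_equal_find_startOfPositive : Prop := ∀ (nums : List Int), Dom_find_startOfPositive nums → Pre_find_startOfPositive nums → Spec_find_startOfPositive nums (find_startOfPositive nums)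

-- ===== LEMMAS AND PROOFS =====

-- first index of a non-negative element, as an Option Nat
def firstNonneg : List Int → Option Nat
  | [] => none
  | x :: xs => if x ≥ 0 then some 0 else (firstNonneg xs).map (· + 1)

theorem scanB_eq (xs : List Int) (i : Int) :
    scanB xs i = match firstNonneg xs with
                 | some j => i + (j : Int)
                 | none => -1 := by
  induction xs generalizing i with
  | nil => simp [scanB, firstNonneg]
  | cons x rest ih =>
    simp only [scanB, firstNonneg]
    by_cases hx : x ≥ 0
    · simp [hx]
    · simp only [hx, if_false, ih]
      cases h : firstNonneg rest with
      | none => simp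
      | some j => simp; ring

theorem firstNonneg_none (xs : List Int) (h : ∀ k, (hk : k < xs.length) → xs[k] < 0) :
    firstNonneg xs = none := by
  induction xs with
  | nil => rfl
  | cons x rest ih =>
    have hx := h 0 (by simp)
    simp only [List.getElem_cons_zero] at hx
    simp only [firstNonneg, if_neg (by omega : ¬ x ≥ 0)]
    rw [ih (fun k hk => by
      have := h (k + 1) (by simpa using Nat.succ_lt_succ hk)
      simpa using this)]
    rfl

theorem firstNonneg_some (xs : List Int) (k : Nat) (hk : k < xs.length)
    (hpos : 0 ≤ xs[k]) (hneg : ∀ j, (hj : j < xs.length) → j < k → xs[j] < 0) :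
    firstNonneg xs = some k := by
  induction xs generalizing k with
  | nil => simp at hk
  | cons x rest ih =>
    cases k with
    | zero =>
      simp only [List.getElem_cons_zero] at hpos
      simp [firstNonneg, hpos]
    | succ k =>
      have hx := hneg 0 (by simp) (by omega)
      simp only [List.getElem_cons_zero] at hx
      simp only [firstNonneg, if_neg (by omega : ¬ x ≥ 0)]
      rw [ih k (by simpa using Nat.succ_lt_succ_iff.mp hk)
        (by simpa using hpos)
        (fun j hj hjk => by
          have := hneg (j + 1) (by simpa using Nat.succ_lt_succ hj) (by omega)
          simpa using this)]
      rfl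

-- the loop invariant: findLoopA computes B's answer
theorem findLoopA_eq (nums : List Int) (low high index : Int)
    (hsorted : List.Pairwise (fun a b => 0 ≤ a → 0 ≤ b) nums)
    (hlow : 0 ≤ low) (hhigh : high ≤ (nums.length : Int) - 1)
    (hneg : ∀ k : Nat, (hk : k < nums.length) → (k : Int) < low → nums[k] < 0)
    (hcase : (index = -1 ∧ high = (nums.length : Int) - 1) ∨
             (index = high + 1 ∧ 0 ≤ index ∧
              ∃ hk : index.toNat < nums.length, 0 ≤ nums[index.toNat])) :
    findLoopA nums low high index = find_startOfPositive_alt nums := by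
  rw [findLoopA]
  by_cases h : low ≤ high
  · simp only [dif_pos h]
    have hd : PySem.Int.floordiv (high - low) 2 = (high - low) / 2 :=
      PySem.Int.floordiv_eq_ediv_of_pos (by omega)
    set mid := low + PySem.Int.floordiv (high - low) 2 with hmid
    have hmb : low ≤ mid ∧ mid ≤ high := by rw [hmid, hd]; omega
    have hmn : 0 ≤ mid ∧ mid < (nums.length : Int) := by omega
    have hget : PySem.List.pyGet? nums mid = some (nums[mid.toNat]'(by omega)) :=
      PySem.List.pyGet?_eq_some_getElem nums hmn.1 hmn.2
    rw [hget]
    by_cases hv : nums[mid.toNat]'(by omega) < 0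
    · simp only [if_pos hv]
      refine findLoopA_eq nums (mid + 1) high index hsorted (by omega) hhigh ?_ hcase
      intro k hk hklt
      rcases lt_or_ge (k : Int) low with hkl | hkl
      · exact hneg k hk hkl
      · -- low ≤ k ≤ mid: sign-monotonicity pushes nums[mid] < 0 down to nums[k]
        rcases eq_or_lt_of_le (by omega : k ≤ mid.toNat) with heq | hlt
        · subst heq; exact hv
        · have himp := (List.pairwise_iff_getElem.mp hsorted) k mid.toNat hk (by omega) hlt
          by_contra hcon
          exact absurd (himp (by omega)) (by omega)
    · simp only [if_neg hv]
      refine findLoopA_eq nums low (mid - 1) mid hsorted hlow (by omega) hneg ?_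
      exact Or.inr ⟨by omega, by omega, ⟨by omega, by omega⟩⟩
  · simp only [dif_neg h]
    rcases hcase with ⟨hidx, hh⟩ | ⟨hidx, h0, hk, hpos⟩
    · -- index = -1, all elements negative
      subst hidx
      rw [find_startOfPositive_alt, scanB_eq,
        firstNonneg_none nums (fun k hk => hneg k hk (by omega))]
    · -- index is the first non-negative position
      rw [find_startOfPositive_alt, scanB_eq,
        firstNonneg_some nums index.toNat hk hpos
          (fun j hj hjk => hneg j hj (by omega))]
      simp [Int.toNat_of_nonneg h0]
termination_by (high + 1 - low).toNat
decreasing_by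
  · simp only [hd] at *; omega
  · simp only [hd] at *; omega

-- ===== VERDICT (by name: the statement is the Claim_ definition above) =====
theorem find_startOfPositive_spec : Claim_equal_find_startOfPositive := by
  intro nums _ hpre
  unfold Spec_find_startOfPositive find_startOfPositive
  exact (findLoopA_eq nums 0 ((nums.length : Int) - 1) (-1) hpre (by omega) (by omega)
    (fun k hk hkl => absurd hkl (by omega))
    (Or.inl ⟨rfl, rfl⟩))
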